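-- pv_equiv track=rewrite | github.com/arthur465/key_levels | order_flow_v3_MARKET_SCANNER.py | detect_delta_trend
-- ===== SOURCE A (Python) =====
-- def detect_delta_trend(history, lookback=5):
--     """Detect if delta is making higher highs or lower highs"""
--     if len(history) < lookback:
--         return "INSUFFICIENT_DATA"
--
--     recent = list(history)[-lookback:]
--     deltas = [r['delta'] for r in recent]
--
--     # Find peaks
--     peaks = []
--     for i in range(1, len(deltas) - 1):
--         if abs(deltas[i]) > abs(deltas[i-1]) and abs(deltas[i]) > abs(deltas[i+1]):
--             peaks.append(deltas[i])
--
--     if len(peaks) >= 2: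
--         if abs(peaks[-1]) > abs(peaks[-2]):
--             return "STRENGTHENING"
--         else:
--             return "WEAKENING"
--
--     return "STABLE"
-- ===== SOURCE B (Python) =====
-- def detect_delta_trend(history, lookback=5):
--     """Detect if delta is making higher highs or lower highs.
--
--     Backward recursive scan with early exit: walk the reversed window and
--     return as soon as the two most recent peaks have been seen; no peaks
--     list is ever built.
--     """
--     if len(history) < lookback:
--         return "INSUFFICIENT_DATA"
--     deltas = [r['delta'] for r in list(history)[-lookback:]]
--
--     def scan(xs, last_peak):
--         # xs is a suffix of the reversed deltas; last_peak is the most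
--         # recent (forward-time) peak found so far, or None.
--         if len(xs) < 3:
--             return "STABLE"
--         c, b, a = xs[0], xs[1], xs[2]
--         if abs(b) > abs(c) and abs(b) > abs(a):
--             if last_peak is None:
--                 return scan(xs[1:], b)
--             return "STRENGTHENING" if abs(last_peak) > abs(b) else "WEAKENING"
--         return scan(xs[1:], last_peak)
--
--     return scan(deltas[::-1], None)
-- ===== Notes on version B (the rewrite author's own statement) =====
-- stated objective: alternative
-- what changed: B replaces A's forward pass that materialises the full peaks list and then indexes peaks[-1]/peaks[-2] by a recursive backward scan over the reversed window that returns immediately once the two most recent peaks are encountered, so no peaks list exists and earlier peaks are never examined.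
import Mathlib
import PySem

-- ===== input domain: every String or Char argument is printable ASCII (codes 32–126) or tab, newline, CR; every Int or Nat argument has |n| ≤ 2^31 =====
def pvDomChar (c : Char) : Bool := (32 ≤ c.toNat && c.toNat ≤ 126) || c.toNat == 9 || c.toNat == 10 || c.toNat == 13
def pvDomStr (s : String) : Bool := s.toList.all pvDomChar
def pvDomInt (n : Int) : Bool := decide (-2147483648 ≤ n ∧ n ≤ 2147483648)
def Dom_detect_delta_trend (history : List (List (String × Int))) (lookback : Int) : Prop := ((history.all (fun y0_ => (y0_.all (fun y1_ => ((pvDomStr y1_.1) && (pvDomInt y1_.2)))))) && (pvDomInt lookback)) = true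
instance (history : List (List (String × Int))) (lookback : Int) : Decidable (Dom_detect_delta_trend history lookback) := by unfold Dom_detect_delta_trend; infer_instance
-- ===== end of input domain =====

-- B scans the reversed window recursively and returns as soon as the two most recent
-- peaks are found, instead of building the whole peaks list and indexing it; objective:
-- alternative (same cost, early-exit backward recursion instead of forward list building).

-- ===== PORT A =====
-- r['delta'] ; total form getD 0 — Pre_ excludes the KeyError inputs
def pvDelta (r : List (String × Int)) : Int := (PySem.Dict.ofList r).getD "delta" 0

def detect_delta_trend (history : List (List (String × Int))) (lookback : Int) : String :=
  if (history.length : Int) < lookback then "INSUFFICIENT_DATA"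
  else
    let recent := PySem.List.slice history (some (-lookback)) none
    let deltas := recent.map pvDelta
    let peaks := (PySem.List.pyRange 1 ((deltas.length : Int) - 1) 1).foldl
      (fun acc i =>
        if |PySem.List.pyGetD deltas i 0| > |PySem.List.pyGetD deltas (i - 1) 0| ∧
           |PySem.List.pyGetD deltas i 0| > |PySem.List.pyGetD deltas (i + 1) 0| then
          acc ++ [PySem.List.pyGetD deltas i 0]
        else acc) []
    if 2 ≤ (peaks.length : Int) then
      if |PySem.List.pyGetD peaks (-1) 0| > |PySem.List.pyGetD peaks (-2) 0| then "STRENGTHENING"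
      else "WEAKENING"
    else "STABLE"

-- ===== PORT B =====
-- Source B's inner 'scan(xs, last_peak)': xs[0]=c, xs[1]=b, xs[2]=a; recursion on xs[1:]
def pvScanB : List Int → Option Int → String
  | c :: b :: a :: t, lp =>
    if |b| > |c| ∧ |b| > |a| then
      match lp with
      | none => pvScanB (b :: a :: t) (some b)
      | some p => if |p| > |b| then "STRENGTHENING" else "WEAKENING"
    else pvScanB (b :: a :: t) lp
  | _, _ => "STABLE"

def detect_delta_trend_alt (history : List (List (String × Int))) (lookback : Int) : String :=
  if (history.length : Int) < lookback then "INSUFFICIENT_DATA"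
  else
    let deltas := (PySem.List.slice history (some (-lookback)) none).map pvDelta
    -- deltas[::-1]
    pvScanB ((PySem.List.slice? deltas none none (-1)).getD []) none

-- ===== PRECONDITION & SPEC =====
-- Pre_ excludes exactly the inputs where Python A raises KeyError: some row of the
-- examined window history[-lookback:] lacks the key 'delta' (only reached when the
-- length guard passes).
def Pre_detect_delta_trend (history : List (List (String × Int))) (lookback : Int) : Prop :=
  (history.length : Int) < lookback ∨
    ((PySem.List.slice history (some (-lookback)) none).all
      (fun r => (PySem.Dict.ofList r).contains "delta")) = true
instance (history : List (List (String × Int))) (lookback : Int) : Decidable (Pre_detect_delta_trend history lookback) := by unfold Pre_detect_delta_trend; infer_instance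

def pvWitness_detect_delta_trend : (List (List (String × Int))) × Int :=
  ([[("delta", 1)], [("delta", 3)], [("delta", 2)]], 3)

def Spec_detect_delta_trend (history : List (List (String × Int))) (lookback : Int) (out : String) : Prop := out = detect_delta_trend_alt history lookback
instance (history : List (List (String × Int))) (lookback : Int) (out : String) : Decidable (Spec_detect_delta_trend history lookback out) := by unfold Spec_detect_delta_trend; infer_instance

-- ===== CLAIM (what is proved, stated in full; the proofs are below) =====
def Claim_equal_detect_delta_trend : Prop := ∀ (history : List (List (String × Int))) (lookback : Int), Dom_detect_delta_trend history lookback → Pre_detect_delta_trend history lookback → Spec_detect_delta_trend history lookback (detect_delta_trend history lookback)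

-- ===== LEMMAS AND PROOFS =====

-- reference peak list, structurally
def pvPeaks3 : List Int → List Int
  | a :: b :: c :: t => (if |b| > |a| ∧ |b| > |c| then [b] else []) ++ pvPeaks3 (b :: c :: t)
  | _ => []

def pvG (ds : List Int) (i : Int) : List Int :=
  if |PySem.List.pyGetD ds i 0| > |PySem.List.pyGetD ds (i - 1) 0| ∧
     |PySem.List.pyGetD ds i 0| > |PySem.List.pyGetD ds (i + 1) 0| then
    [PySem.List.pyGetD ds i 0]
  else []

lemma pvGetShift (x : Int) (rest : List Int) (m : Nat) :
    PySem.List.pyGetD (x :: rest) ((m : Int) + 1) 0 = PySem.List.pyGetD rest (m : Int) 0 := by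
  rw [show ((m : Int) + 1) = (((m + 1 : Nat)) : Int) by push_cast; ring,
      PySem.List.pyGetD_natCast, PySem.List.pyGetD_natCast, List.getD_cons_succ]

lemma pvShift (x : Int) (rest : List Int) (k : Nat) :
    pvG (x :: rest) ((k : Int) + 2) = pvG rest ((k : Int) + 1) := by
  unfold pvG
  rw [show ((k : Int) + 2 + 1) = (((k + 2 : Nat)) : Int) + 1 by push_cast; ring,
      show ((k : Int) + 2 - 1) = (((k : Nat)) : Int) + 1 by ring,
      show ((k : Int) + 2) = (((k + 1 : Nat)) : Int) + 1 by push_cast; ring,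
      pvGetShift, pvGetShift, pvGetShift,
      show ((k : Int) + 1 + 1) = (((k + 2 : Nat)) : Int) by push_cast; ring,
      show ((k : Int) + 1 - 1) = (((k : Nat)) : Int) by ring,
      show ((k : Int) + 1) = (((k + 1 : Nat)) : Int) by push_cast; ring]

lemma pvPeaksA_eq (ds : List Int) :
    (PySem.List.pyRange 1 ((ds.length : Int) - 1) 1).flatMap (pvG ds) = pvPeaks3 ds := by
  induction ds with
  | nil => simp [PySem.List.pyRange_one_eq_nil, pvPeaks3]
  | cons a rest ih =>
    match rest with
    | [] => simp [PySem.List.pyRange_one_eq_nil, pvPeaks3]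
    | [b] =>
      rw [show ((([a, b] : List Int).length : Int) - 1) = 1 by simp]
      simp [PySem.List.pyRange_one_eq_nil, pvPeaks3]
    | b :: c :: t =>
      have hn : ((a :: b :: c :: t).length : Int) - 1 = (t.length : Int) + 2 := by
        simp; ring
      rw [hn, PySem.List.pyRange_one_cons (by omega), List.flatMap_cons,
          show ((1 : Int) + 1) = 2 from rfl,
          PySem.List.pyRange_one 2 ((t.length : Int) + 2),
          show ((t.length : Int) + 2 - 2) = ((t.length : Nat) : Int) by ring,
          Int.toNat_natCast, List.flatMap_map]
      have hpoint : ∀ k ∈ List.range t.length,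
          pvG (a :: b :: c :: t) ((2 : Int) + (k : Int)) = pvG (b :: c :: t) ((1 : Int) + (k : Int)) := by
        intro k _
        rw [show ((2 : Int) + (k : Int)) = ((k : Int) + 2) by ring,
            show ((1 : Int) + (k : Int)) = ((k : Int) + 1) by ring]
        exact pvShift a (b :: c :: t) k
      rw [List.flatMap_congr hpoint, ← List.flatMap_map (fun k : Nat => (1 : Int) + (k : Int)),
          show List.range t.length = List.range (((b :: c :: t).length : Int) - 1 - 1).toNat by
            rw [show (((b :: c :: t).length : Int) - 1 - 1) = ((t.length : Nat) : Int) by simp,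
                Int.toNat_natCast],
          ← PySem.List.pyRange_one 1 (((b :: c :: t).length : Int) - 1), ih]
      have t2 : PySem.List.pyGetD (a :: b :: c :: t) (1 - 1) 0 = a := by
        rw [show ((1 : Int) - 1) = 0 by norm_num, PySem.List.pyGetD_zero_cons]
      have t1 : PySem.List.pyGetD (a :: b :: c :: t) 1 0 = b := by
        rw [show (1 : Int) = ((0 : Nat) : Int) + 1 by norm_num, pvGetShift,
            show (((0 : Nat)) : Int) = (0 : Int) by norm_num, PySem.List.pyGetD_zero_cons]
      have t3 : PySem.List.pyGetD (a :: b :: c :: t) (1 + 1) 0 = c := by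
        rw [show ((1 : Int) + 1) = ((1 : Nat) : Int) + 1 by norm_num, pvGetShift,
            show (((1 : Nat)) : Int) = ((0 : Nat) : Int) + 1 by norm_num, pvGetShift,
            show (((0 : Nat)) : Int) = (0 : Int) by norm_num, PySem.List.pyGetD_zero_cons]
      have hg1 : pvG (a :: b :: c :: t) 1
          = (if |b| > |a| ∧ |b| > |c| then [b] else []) := by
        unfold pvG
        rw [t2, t3, t1]
      rw [hg1]
      rfl

-- unfolding pvPeaks3 on x :: y :: t knowing only the head of t
lemma pvPeaks3_cons₂ (x y : Int) (t : List Int) :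
    pvPeaks3 (x :: y :: t)
      = (t.head?.elim [] (fun z => if |y| > |x| ∧ |y| > |z| then [y] else []))
        ++ pvPeaks3 (y :: t) := by
  cases t with
  | nil => rfl
  | cons z s => rfl

-- appending one element at the end only adds (possibly) the final-triple peak
lemma pvPeaks3_snoc : ∀ (u : List Int) (p q r : Int),
    pvPeaks3 (u ++ [p, q, r])
      = pvPeaks3 (u ++ [p, q]) ++ (if |q| > |p| ∧ |q| > |r| then [q] else []) := by
  intro u
  induction u with
  | nil =>
    intro p q r
    show pvPeaks3 [p, q, r] = pvPeaks3 [p, q] ++ _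
    simp [pvPeaks3]
  | cons x u' ih =>
    intro p q r
    cases u' with
    | nil =>
      show pvPeaks3 [x, p, q, r] = pvPeaks3 [x, p, q] ++ _
      simp [pvPeaks3]
    | cons y u'' =>
      have h1 : (x :: y :: u'') ++ [p, q, r] = x :: y :: (u'' ++ [p, q, r]) := by simp
      have h2 : (x :: y :: u'') ++ [p, q] = x :: y :: (u'' ++ [p, q]) := by simp
      rw [h1, h2, pvPeaks3_cons₂, pvPeaks3_cons₂]
      have hh : (u'' ++ [p, q, r]).head? = (u'' ++ [p, q]).head? := by
        cases u'' <;> simp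
      rw [hh,
          show (y :: (u'' ++ [p, q, r])) = (y :: u'') ++ [p, q, r] by simp,
          show (y :: (u'' ++ [p, q])) = (y :: u'') ++ [p, q] by simp,
          ih p q r, List.append_assoc]

-- the peaks of the reversed list are the reversed peaks
lemma pvPeaks3_rev (xs : List Int) : pvPeaks3 xs.reverse = (pvPeaks3 xs).reverse := by
  induction hn : xs.length generalizing xs with
  | zero =>
    have : xs = [] := List.length_eq_zero_iff.mp hn
    subst this; rfl
  | succ n ih =>
    match xs with
    | [] => simp at hn
    | [a] => rfl
    | [a, b] => rfl
    | a :: b :: c :: t =>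
      have hrev : (a :: b :: c :: t).reverse = (t.reverse ++ [c, b]) ++ [a] := by simp
      have hrev2 : (b :: c :: t).reverse = t.reverse ++ [c, b] := by simp
      have hlen : (b :: c :: t).length = n := by simp at hn ⊢; omega
      have hsnoc : pvPeaks3 (t.reverse ++ [c, b, a])
          = pvPeaks3 (t.reverse ++ [c, b]) ++ (if |b| > |c| ∧ |b| > |a| then [b] else []) :=
        pvPeaks3_snoc t.reverse c b a
      calc pvPeaks3 (a :: b :: c :: t).reverse
          = pvPeaks3 (t.reverse ++ [c, b, a]) := by rw [hrev]; simp
        _ = pvPeaks3 ((b :: c :: t).reverse) ++ (if |b| > |c| ∧ |b| > |a| then [b] else []) := by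
              rw [hsnoc, hrev2]
        _ = (pvPeaks3 (b :: c :: t)).reverse ++ (if |b| > |c| ∧ |b| > |a| then [b] else []) := by
              rw [ih _ hlen]
        _ = (pvPeaks3 (a :: b :: c :: t)).reverse := by
              show _ = ((if |b| > |a| ∧ |b| > |c| then [b] else []) ++ pvPeaks3 (b :: c :: t)).reverse
              rw [List.reverse_append]
              have hcomm : (if |b| > |a| ∧ |b| > |c| then ([b] : List Int) else [])
                   = (if |b| > |c| ∧ |b| > |a| then [b] else []) := by
                split_ifs <;> tauto
              rw [hcomm]
              split_ifs <;> simp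

-- what pvScanB computes, as a function of the peak list of its input
def pvRes : List Int → Option Int → String
  | p1 :: p2 :: _, none => if |p1| > |p2| then "STRENGTHENING" else "WEAKENING"
  | _, none => "STABLE"
  | q :: _, some p => if |p| > |q| then "STRENGTHENING" else "WEAKENING"
  | [], some _ => "STABLE"

lemma pvScanB_char (xs : List Int) : ∀ lp, pvScanB xs lp = pvRes (pvPeaks3 xs) lp := by
  induction xs with
  | nil => intro lp; cases lp <;> rfl
  | cons x rest ih =>
    intro lp
    match rest with
    | [] => cases lp <;> rfl
    | [y] => cases lp <;> rfl
    | y :: z :: t =>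
      show (if |y| > |x| ∧ |y| > |z| then _ else pvScanB (y :: z :: t) lp) = _
      rw [show pvPeaks3 (x :: y :: z :: t)
            = (if |y| > |x| ∧ |y| > |z| then [y] else []) ++ pvPeaks3 (y :: z :: t) from rfl]
      by_cases hc : |y| > |x| ∧ |y| > |z|
      · rw [if_pos hc, if_pos hc]
        cases lp with
        | none =>
          show pvScanB (y :: z :: t) (some y) = pvRes ([y] ++ pvPeaks3 (y :: z :: t)) none
          rw [ih (some y)]
          cases hP : pvPeaks3 (y :: z :: t) <;> simp [pvRes]
        | some p =>
          show (if |p| > |y| then "STRENGTHENING" else "WEAKENING")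
              = pvRes ([y] ++ pvPeaks3 (y :: z :: t)) (some p)
          rw [List.singleton_append]
          cases pvPeaks3 (y :: z :: t) <;> rfl
      · rw [if_neg hc, if_neg hc, List.nil_append, ih lp]

lemma pvGetNeg1 (u : List Int) (x y : Int) :
    PySem.List.pyGetD (u ++ [x, y]) (-1) 0 = y := by
  rw [show (u ++ [x, y]) = (u ++ [x]) ++ [y] by simp]
  exact PySem.List.pyGetD_neg_one_append_singleton _ _ _

lemma pvGetNeg2 (u : List Int) (x y : Int) :
    PySem.List.pyGetD (u ++ [x, y]) (-2) 0 = x := by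
  rw [PySem.List.pyGetD_neg_ofNat (u ++ [x, y]) 2 0 (by omega) (by simp)]
  have h2 : (u ++ [x, y])[(u ++ [x, y]).length - 2]? = some x := by
    rw [show (u ++ [x, y]).length - 2 = u.length by simp]
    rw [List.getElem?_append_right (by omega)]
    simp
  have h3 := List.getElem?_eq_getElem (l := u ++ [x, y]) (i := (u ++ [x, y]).length - 2) (by simp)
  rw [h3] at h2
  exact Option.some.inj h2

-- A's tail (after the guard) as a function of the delta list equals B's backward scan
lemma pvMainEq (ds : List Int) :
    (let peaks := (PySem.List.pyRange 1 ((ds.length : Int) - 1) 1).foldl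
      (fun acc i =>
        if |PySem.List.pyGetD ds i 0| > |PySem.List.pyGetD ds (i - 1) 0| ∧
           |PySem.List.pyGetD ds i 0| > |PySem.List.pyGetD ds (i + 1) 0| then
          acc ++ [PySem.List.pyGetD ds i 0]
        else acc) [];
     if 2 ≤ (peaks.length : Int) then
       if |PySem.List.pyGetD peaks (-1) 0| > |PySem.List.pyGetD peaks (-2) 0| then "STRENGTHENING"
       else "WEAKENING"
     else "STABLE")
    = pvScanB ds.reverse none := by
  have hfold : (PySem.List.pyRange 1 ((ds.length : Int) - 1) 1).foldl
      (fun acc i =>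
        if |PySem.List.pyGetD ds i 0| > |PySem.List.pyGetD ds (i - 1) 0| ∧
           |PySem.List.pyGetD ds i 0| > |PySem.List.pyGetD ds (i + 1) 0| then
          acc ++ [PySem.List.pyGetD ds i 0]
        else acc) [] = pvPeaks3 ds := by
    have hstep : (fun (acc : List Int) (i : Int) =>
        if |PySem.List.pyGetD ds i 0| > |PySem.List.pyGetD ds (i - 1) 0| ∧
           |PySem.List.pyGetD ds i 0| > |PySem.List.pyGetD ds (i + 1) 0| then
          acc ++ [PySem.List.pyGetD ds i 0]
        else acc) = (fun acc i => acc ++ pvG ds i) := by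
      funext acc i; unfold pvG; split_ifs <;> simp
    rw [hstep, PySem.List.foldl_append_eq_flatMap, List.nil_append, pvPeaksA_eq]
  rw [hfold, pvScanB_char, pvPeaks3_rev]
  rcases hr : (pvPeaks3 ds).reverse with _ | ⟨y, _ | ⟨x, rev⟩⟩
  · have hP : pvPeaks3 ds = [] := by
      have := congrArg List.reverse hr; simpa using this
    simp only [hP]
    rfl
  · have hP : pvPeaks3 ds = [y] := by
      have := congrArg List.reverse hr; simpa using this
    simp only [hP]
    rfl
  · have hP : pvPeaks3 ds = rev.reverse ++ [x, y] := by
      have := congrArg List.reverse hr; simpa using this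
    simp only [hP]
    rw [pvGetNeg1, pvGetNeg2, if_pos (by simp)]
    rfl

-- ===== VERDICT (by name: the statement is the Claim_ definition above) =====
theorem detect_delta_trend_spec : Claim_equal_detect_delta_trend := by
  intro history lookback _ _
  unfold Spec_detect_delta_trend detect_delta_trend detect_delta_trend_alt
  by_cases h : (history.length : Int) < lookback
  · simp [h]
  · simp only [h, if_false]
    rw [PySem.List.slice?_none_none_neg_one, Option.getD_some]
    exact pvMainEq _
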